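-- pv_equiv track=rewrite | github.com/Lama1421f/python-lab | Untitled19.py | term_document_incidence_matrix
-- ===== SOURCE A (Python) =====
-- boolean_operators = {'AND', 'OR', 'NOT'}
--
-- def get_terms (data):
--     terms=[]
--     for doc in data:
--         for term in data[doc].split() :
--             terms.append(term)
--     return terms
--
-- def get_unique_terms(terms):
--     unique_terms=[]
--     for d in terms :
--         if d not in unique_terms:
--             unique_terms.append(d)
--     return unique_terms
--
-- def get_document_collection_terms(data):
--     docs_colllection={}
--     for doc in data:
--         if doc not in boolean_operators :
--             docs_colllection[doc]=get_unique_terms(data[doc].split())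
--     return docs_colllection
--
-- def term_document_incidence_matrix(collection):
-- ## list of terms from the data file collection
--     terms = get_terms(collection)
-- #list of unique terms
--     uique_terms = get_unique_terms(terms)
-- #Document collection terms
--     docs_terms=get_document_collection_terms(collection)
-- #TermDocumentIncidenceMatrix
--     term_docs_matrix= { }
--     for term in uique_terms :
--         vector=[]
--         for c in docs_terms:
--             if term in docs_terms[c]:
--                 vector.append(1)
--             else :
--                 vector.append(0)
--         term_docs_matrix[term]=vector
--     return term_docs_matrix
-- ===== SOURCE B (Python) =====
-- boolean_operators = {'AND', 'OR', 'NOT'}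
--
-- def term_document_incidence_matrix(collection):
--     # ordered unique term list over ALL docs (first appearance)
--     unique_terms = list(dict.fromkeys(
--         t for text in collection.values() for t in text.split()))
--     # texts of the non-boolean-operator docs, in order
--     nb_texts = [text for doc, text in collection.items()
--                 if doc not in boolean_operators]
--     n = len(nb_texts)
--     matrix = {term: [0] * n for term in unique_terms}
--     # single document-major pass scattering ones into the table
--     for i, text in enumerate(nb_texts):
--         for t in text.split():
--             matrix[t][i] = 1
--     return matrix
-- ===== Notes on version B (the rewrite author's own statement) =====
-- stated objective: faster
-- what changed: Replaces the term-major matrix build (for each unique term, scan every document's unique-term list for membership) and the quadratic list-based dedup with dict.fromkeys dedup plus one document-major pass that scatters 1s into pre-zeroed rows.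
import Mathlib
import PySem

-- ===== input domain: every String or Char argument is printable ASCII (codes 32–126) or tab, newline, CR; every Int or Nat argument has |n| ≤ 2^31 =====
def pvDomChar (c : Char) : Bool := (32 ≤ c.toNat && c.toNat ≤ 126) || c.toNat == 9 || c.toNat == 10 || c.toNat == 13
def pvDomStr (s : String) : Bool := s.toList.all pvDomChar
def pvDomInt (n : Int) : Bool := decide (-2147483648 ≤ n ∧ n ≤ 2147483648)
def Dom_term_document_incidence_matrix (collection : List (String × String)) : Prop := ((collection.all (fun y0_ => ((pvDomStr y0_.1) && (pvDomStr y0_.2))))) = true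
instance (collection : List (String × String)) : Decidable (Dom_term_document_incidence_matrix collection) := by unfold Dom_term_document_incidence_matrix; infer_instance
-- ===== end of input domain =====

-- B replaces A's term-major matrix build (membership scan per term per document) and its
-- quadratic list dedup with ordered-dedup plus one document-major pass scattering 1s into
-- pre-zeroed rows; the returned matrix is proved identical.

-- Python `collection` is a dict: the association list is decoded with the first binding per
-- key winning (the harness convention); both ports share this input decoding.
def pvFirstKeyWins (l : List (String × String)) : List (String × String) :=
  l.foldl (fun acc p => if (acc.map (·.1)).contains p.1 then acc else acc ++ [p]) []

-- module constant `boolean_operators = {'AND','OR','NOT'}` (shared by both Pythons)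
def pvBoolOps : PySem.Set String := PySem.Set.ofList ["AND", "OR", "NOT"]

-- ===== PORT A =====
-- `for doc in data: for term in data[doc].split()` — dict iteration plus lookup of each
-- key is iteration over the items (exact: keys are unique after decoding).
def pvGetTerms (data : List (String × String)) : List String :=
  data.foldl (fun terms p => (PySem.Str.split₀ p.2).foldl (fun ts t => ts ++ [t]) terms) []
def pvGetUniqueTerms (terms : List String) : List String :=
  terms.foldl (fun u d => if u.contains d then u else u ++ [d]) []
def pvGetDocCollectionTerms (data : List (String × String)) : PySem.Dict String (List String) :=
  data.foldl (fun dc p =>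
    if pvBoolOps.contains p.1 then dc
    else dc.insert p.1 (pvGetUniqueTerms (PySem.Str.split₀ p.2))) PySem.Dict.empty
def term_document_incidence_matrix (collection : List (String × String)) : List (String × List Int) :=
  let data := pvFirstKeyWins collection
  let uique_terms := pvGetUniqueTerms (pvGetTerms data)
  let docs_terms := pvGetDocCollectionTerms data
  (uique_terms.foldl (fun m term =>
      m.insert term ((docs_terms.items).foldl (fun v c =>
        if c.2.contains term then v ++ [(1 : Int)] else v ++ [(0 : Int)]) [])) PySem.Dict.empty).items

-- ===== PORT B =====
def term_document_incidence_matrix_alt (collection : List (String × String)) : List (String × List Int) :=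
  let data := pvFirstKeyWins collection
  let uniqueTerms := PySem.List.dedup (data.flatMap (fun p => PySem.Str.split₀ p.2))
  let nbTexts := (data.filter (fun p => !(pvBoolOps.contains p.1))).map (·.2)
  let init := uniqueTerms.foldl (fun d t =>
      d.insert t (List.replicate nbTexts.length (0 : Int))) PySem.Dict.empty
  ((PySem.List.enumerate nbTexts 0).foldl (fun d p =>
      (PySem.Str.split₀ p.2).foldl (fun d t =>
        d.insert t (PySem.List.pySetD (d.getD t []) p.1 (1 : Int))) d) init).items

-- ===== PRECONDITION & SPEC =====
def Spec_term_document_incidence_matrix (collection : List (String × String)) (out : List (String × List Int)) : Prop := out = term_document_incidence_matrix_alt collection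
instance (collection : List (String × String)) (out : List (String × List Int)) : Decidable (Spec_term_document_incidence_matrix collection out) := by unfold Spec_term_document_incidence_matrix; infer_instance

-- ===== CLAIM (what is proved, stated in full; the proofs are below) =====
def Claim_equal_term_document_incidence_matrix : Prop := ∀ (collection : List (String × String)), Dom_term_document_incidence_matrix collection → Spec_term_document_incidence_matrix collection (term_document_incidence_matrix collection)

-- ===== LEMMAS AND PROOFS =====

-- the decoded association list has pairwise-distinct keys
theorem pvFirstKeyWins_nodup_aux (l : List (String × String)) : ∀ acc : List (String × String),
    (acc.map (·.1)).Nodup → ((l.foldl (fun acc p => if (acc.map (·.1)).contains p.1 then acc else acc ++ [p]) acc).map (·.1)).Nodup := by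
  induction l with
  | nil => intro acc h; simpa using h
  | cons p l ih =>
    intro acc h
    simp only [List.foldl_cons]
    by_cases hc : ((acc.map (·.1)).contains p.1 = true)
    · rw [if_pos hc]; exact ih acc h
    · rw [if_neg hc]
      apply ih
      simp only [List.map_append, List.map_cons, List.map_nil]
      refine List.Nodup.append h (by simp) ?_
      rw [List.disjoint_singleton]
      exact fun hx => hc (List.contains_iff_mem.mpr hx)
theorem pvFirstKeyWins_nodup (l : List (String × String)) :
    ((pvFirstKeyWins l).map (·.1)).Nodup := pvFirstKeyWins_nodup_aux l [] (by simp)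

-- A's get_unique_terms is ordered first-occurrence dedup
theorem pvGetUniqueTerms_eq (ts : List String) :
    pvGetUniqueTerms ts = PySem.List.dedup ts := by
  rw [PySem.List.dedup_eq_ofList, PySem.Set.ofList_eq_foldl]; rfl

-- A's get_terms flattens the split texts
theorem pvGetTerms_eq (data : List (String × String)) :
    pvGetTerms data = data.flatMap (fun p => PySem.Str.split₀ p.2) := by
  unfold pvGetTerms
  have : ∀ p : String × String, ∀ ts : List String,
      (PySem.Str.split₀ p.2).foldl (fun ts t => ts ++ [t]) ts = ts ++ PySem.Str.split₀ p.2 :=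
    fun p ts => PySem.List.foldl_append_singleton_eq_self _ _
  simp only [this]
  simpa using PySem.List.foldl_append_eq_flatMap (fun p : String × String => PySem.Str.split₀ p.2) data []

-- A's get_document_collection_terms in closed form
theorem pvDocCollectionTerms_items (data : List (String × String))
    (h : (data.map (·.1)).Nodup) :
    (pvGetDocCollectionTerms data).items
      = (data.filter (fun p => !(pvBoolOps.contains p.1))).map
          (fun p => (p.1, PySem.List.dedup (PySem.Str.split₀ p.2))) := by
  unfold pvGetDocCollectionTerms
  have hswap : ∀ (dc : PySem.Dict String (List String)) (p : String × String),
      (if pvBoolOps.contains p.1 then dc else dc.insert p.1 (pvGetUniqueTerms (PySem.Str.split₀ p.2)))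
      = (if (!(pvBoolOps.contains p.1)) = true then dc.insert p.1 (pvGetUniqueTerms (PySem.Str.split₀ p.2)) else dc) := by
    intro dc p; by_cases hb : pvBoolOps.contains p.1 = true <;> simp_all
  simp only [hswap]
  rw [PySem.List.foldl_if_eq_foldl_filter]
  rw [PySem.Dict.items_foldl_insert_fresh (k := fun p : String × String => p.1)
      (v := fun p => pvGetUniqueTerms (PySem.Str.split₀ p.2))]
  · simp [pvGetUniqueTerms_eq]
    rfl
  · intro a _; rfl
  · exact List.Nodup.sublist (List.Sublist.map _ List.filter_sublist) h

theorem dedup_contains (xs : List String) (t : String) :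
    (PySem.List.dedup xs).contains t = xs.contains t := by
  by_cases h : t ∈ xs
  · simp [List.contains_iff_mem, PySem.List.mem_dedup, h]
  · simp [List.contains_iff_mem, PySem.List.mem_dedup, h]

-- A's matrix build in closed form
theorem portA_closed (data : List (String × String)) (h : (data.map (·.1)).Nodup) :
    ((pvGetUniqueTerms (pvGetTerms data)).foldl (fun m term =>
        m.insert term (((pvGetDocCollectionTerms data).items).foldl (fun v c =>
          if c.2.contains term then v ++ [(1 : Int)] else v ++ [(0 : Int)]) [])) PySem.Dict.empty).items
    = (PySem.List.dedup (data.flatMap (fun p => PySem.Str.split₀ p.2))).map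
        (fun t => (t, (data.filter (fun p => !(pvBoolOps.contains p.1))).map
          (fun p => if (PySem.Str.split₀ p.2).contains t then (1 : Int) else 0))) := by
  have hvec : ∀ term : String, ((pvGetDocCollectionTerms data).items).foldl (fun v c =>
      if c.2.contains term then v ++ [(1 : Int)] else v ++ [(0 : Int)]) []
      = (data.filter (fun p => !(pvBoolOps.contains p.1))).map
          (fun p => if (PySem.Str.split₀ p.2).contains term then (1 : Int) else 0) := by
    intro term
    have e1 : (fun (v : List Int) (c : String × List String) =>
        if c.2.contains term then v ++ [(1 : Int)] else v ++ [(0 : Int)])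
        = (fun v c => v ++ [if c.2.contains term then (1 : Int) else 0]) := by
      funext v c; by_cases hb : term ∈ c.2 <;> simp [hb]
    rw [e1, PySem.List.foldl_append_singleton_eq_map, pvDocCollectionTerms_items data h]
    simp [List.map_map, Function.comp, dedup_contains]
  rw [pvGetTerms_eq, pvGetUniqueTerms_eq]
  simp only [hvec]
  rw [PySem.Dict.items_foldl_insert_fresh (k := fun t : String => t)
      (v := fun term => (data.filter (fun p => !(pvBoolOps.contains p.1))).map
          (fun p => if (PySem.Str.split₀ p.2).contains term then (1 : Int) else 0))]
  · rfl
  · intro a _; rfl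
  · simpa using PySem.List.nodup_dedup (data.flatMap (fun p => PySem.Str.split₀ p.2))

-- setting 1 twice at the same nonnegative index is one set
theorem pvSetD_idem (v : List Int) (i : Int) (hi : 0 ≤ i) :
    PySem.List.pySetD (PySem.List.pySetD v i 1) i 1 = PySem.List.pySetD v i 1 := by
  rw [PySem.List.pySetD_of_nonneg (h := hi), PySem.List.pySetD_of_nonneg (h := hi),
      List.set_set]

-- inner scatter loop over the terms of one document
theorem pvScatter_inner (ts : List String) (i : Int) (hi : 0 ≤ i)
    (d : PySem.Dict String (List Int)) (hnd : d.keys.Nodup)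
    (hc : ∀ t ∈ ts, d.contains t = true) :
    (ts.foldl (fun d t => d.insert t (PySem.List.pySetD (d.getD t []) i 1)) d).items
      = d.items.map (fun kv =>
          (kv.1, if ts.contains kv.1 then PySem.List.pySetD kv.2 i 1 else kv.2)) := by
  induction ts generalizing d with
  | nil => simp
  | cons t ts ih =>
    have hct : d.contains t = true := hc t (by simp)
    have hitems : (d.insert t (PySem.List.pySetD (d.getD t []) i 1)).items
        = d.items.map (fun kv =>
            (kv.1, if kv.1 == t then PySem.List.pySetD kv.2 i 1 else kv.2)) := by
      rw [PySem.Dict.items_insert_of_contains (h := hct)]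
      apply List.map_congr_left
      intro kv hkv
      by_cases he : kv.1 == t
      · have ht : kv.1 = t := by simpa using he
        have : d.getD t [] = kv.2 := by
          subst ht
          exact PySem.Dict.getD_of_mem_items (d := d) (h := by simpa using hkv) (hnd := hnd) (d0 := [])
        simp [he, ht, this]
      · simp [he]
    have hkeys : (d.insert t (PySem.List.pySetD (d.getD t []) i 1)).keys = d.keys :=
      PySem.Dict.keys_insert_of_contains (v := PySem.List.pySetD (d.getD t []) i 1) (h := hct)
    simp only [List.foldl_cons]
    rw [ih _ (by rw [hkeys]; exact hnd)
        (fun u hu => by rw [PySem.Dict.contains_iff_mem_keys, hkeys,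
          ← PySem.Dict.contains_iff_mem_keys]; exact hc u (by simp [hu]))]
    rw [hitems, List.map_map]
    apply List.map_congr_left
    intro kv _
    simp only [Function.comp]
    by_cases he : kv.1 == t
    · have ht : kv.1 = t := by simpa using he
      by_cases hts : ts.contains kv.1 = true <;>
        simp [he, ht, hts, pvSetD_idem _ _ hi]
    · have ht : ¬ (kv.1 = t) := by simpa using he
      by_cases hts : ts.contains kv.1 = true <;> simp [he, ht, hts]

-- outer scatter loop over the enumerated documents
theorem pvScatter_outer (L : List (Int × String))
    (d : PySem.Dict String (List Int)) (hnd : d.keys.Nodup)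
    (hc : ∀ p ∈ L, ∀ t ∈ PySem.Str.split₀ p.2, d.contains t = true)
    (hi : ∀ p ∈ L, 0 ≤ p.1) :
    (L.foldl (fun d p =>
        (PySem.Str.split₀ p.2).foldl (fun d t =>
          d.insert t (PySem.List.pySetD (d.getD t []) p.1 1)) d) d).items
      = d.items.map (fun kv =>
          (kv.1, L.foldl (fun v p =>
            if (PySem.Str.split₀ p.2).contains kv.1 then PySem.List.pySetD v p.1 1 else v) kv.2)) := by
  induction L generalizing d with
  | nil => simp
  | cons q L ih =>
    have hq := pvScatter_inner (PySem.Str.split₀ q.2) q.1 (hi q (by simp)) d hnd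
      (fun t ht => hc q (by simp) t ht)
    set d' := (PySem.Str.split₀ q.2).foldl (fun d t =>
        d.insert t (PySem.List.pySetD (d.getD t []) q.1 1)) d with hd'
    have hkeys : d'.keys = d.keys := by
      show d'.items.map (·.1) = d.items.map (·.1)
      rw [hq, List.map_map]; rfl
    simp only [List.foldl_cons]
    rw [ih d' (by rw [hkeys]; exact hnd)
        (fun p hp t ht => by
          rw [PySem.Dict.contains_iff_mem_keys, hkeys, ← PySem.Dict.contains_iff_mem_keys]
          exact hc p (by simp [hp]) t ht)
        (fun p hp => hi p (by simp [hp]))]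
    rw [hq, List.map_map]
    rfl

-- setting at the border position of an append
theorem pvSetMid (w : List Int) (y c : Int) (r : List Int) :
    (w ++ y :: r).set w.length c = w ++ c :: r := by
  induction w with
  | nil => rfl
  | cons a w ihw => simp [ihw]

-- the column fold over the enumeration produces the incidence row
theorem pvColumn (t : String) (nb : List String) : ∀ (w : List Int),
    (PySem.List.enumerate nb (w.length : Int)).foldl (fun v p =>
        if (PySem.Str.split₀ p.2).contains t then PySem.List.pySetD v p.1 1 else v)
      (w ++ List.replicate nb.length (0 : Int))
    = w ++ nb.map (fun s => if (PySem.Str.split₀ s).contains t then (1 : Int) else 0) := by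
  induction nb with
  | nil => intro w; simp [PySem.List.enumerate_nil]
  | cons s nb ih =>
    intro w
    rw [PySem.List.enumerate_cons]
    simp only [List.length_cons, List.replicate_succ, List.foldl_cons, List.map_cons]
    have hset : PySem.List.pySetD (w ++ (0 : Int) :: List.replicate nb.length 0) (w.length : Int) 1
        = w ++ (1 : Int) :: List.replicate nb.length 0 := by
      rw [PySem.List.pySetD_of_nonneg (h := Int.natCast_nonneg _)]
      simpa using pvSetMid w 0 1 (List.replicate nb.length 0)
    have ihw : ∀ c : Int,
        (PySem.List.enumerate nb ((w.length : Int) + 1)).foldl (fun v p =>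
            if (PySem.Str.split₀ p.2).contains t then PySem.List.pySetD v p.1 1 else v)
          (w ++ c :: List.replicate nb.length (0 : Int))
        = w ++ c :: nb.map (fun s => if (PySem.Str.split₀ s).contains t then (1 : Int) else 0) := by
      intro c
      have h := ih (w ++ [c])
      simp only [List.length_append, List.length_cons, List.length_nil, Nat.cast_add,
        Nat.cast_one, List.append_assoc, List.cons_append, List.nil_append] at h
      exact h
    by_cases hb : (PySem.Str.split₀ s).contains t = true
    · simp only [hb, if_true, hset, ihw 1]
    · simp only [hb, Bool.false_eq_true, if_false, ihw 0]

-- B's matrix build in the same closed form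
theorem portB_closed (data : List (String × String)) (h : (data.map (·.1)).Nodup) :
    (let uniqueTerms := PySem.List.dedup (data.flatMap (fun p => PySem.Str.split₀ p.2))
     let nbTexts := (data.filter (fun p => !(pvBoolOps.contains p.1))).map (·.2)
     let init := uniqueTerms.foldl (fun d t =>
         d.insert t (List.replicate nbTexts.length (0 : Int))) PySem.Dict.empty
     ((PySem.List.enumerate nbTexts 0).foldl (fun d p =>
         (PySem.Str.split₀ p.2).foldl (fun d t =>
           d.insert t (PySem.List.pySetD (d.getD t []) p.1 (1 : Int))) d) init).items)
    = (PySem.List.dedup (data.flatMap (fun p => PySem.Str.split₀ p.2))).map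
        (fun t => (t, (data.filter (fun p => !(pvBoolOps.contains p.1))).map
          (fun p => if (PySem.Str.split₀ p.2).contains t then (1 : Int) else 0))) := by
  set U := PySem.List.dedup (data.flatMap (fun p => PySem.Str.split₀ p.2)) with hU
  set nb := (data.filter (fun p => !(pvBoolOps.contains p.1))).map (·.2) with hnb
  have hUnodup : U.Nodup := by rw [hU]; exact PySem.List.nodup_dedup _
  have hinit : (U.foldl (fun d t =>
      d.insert t (List.replicate nb.length (0 : Int))) PySem.Dict.empty).items
      = U.map (fun t => (t, List.replicate nb.length (0 : Int))) := by
    rw [PySem.Dict.items_foldl_insert_fresh (k := fun t : String => t)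
        (v := fun _ => List.replicate nb.length (0 : Int))]
    · rfl
    · intro a _; rfl
    · simpa using hUnodup
  set init := U.foldl (fun d t =>
      d.insert t (List.replicate nb.length (0 : Int))) PySem.Dict.empty with hinitdef
  have hkeys : init.keys = U := by
    show init.items.map (·.1) = U
    rw [hinit, List.map_map]
    exact List.map_id U
  have hcont : ∀ t : String, t ∈ U → init.contains t = true := by
    intro t ht
    rw [PySem.Dict.contains_iff_mem_keys, hkeys]; exact ht
  rw [pvScatter_outer _ init (by rw [hkeys]; exact hUnodup)
      (fun p hp t ht => by
        apply hcont
        rw [hU, PySem.List.mem_dedup]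
        have hp2 : p.2 ∈ nb := by
          have := PySem.List.map_snd_enumerate nb (0 : Int)
          rw [← this]
          exact List.mem_map_of_mem hp
        rw [hnb] at hp2
        rcases List.mem_map.mp hp2 with ⟨q, hq, hq2⟩
        refine List.mem_flatMap.mpr ⟨q, List.mem_of_mem_filter hq, ?_⟩
        rw [hq2]; exact ht)
      (fun p hp => by
        rcases (PySem.List.mem_enumerate_iff _ _ _).mp hp with ⟨k, hk, rfl⟩
        positivity)]
  rw [hinit, List.map_map]
  apply List.map_congr_left
  intro t _
  simp only [Function.comp]
  have hcol := pvColumn t nb ([] : List Int)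
  simp only [List.length_nil, Nat.cast_zero, List.nil_append] at hcol
  rw [hcol, hnb, List.map_map]
  rfl

-- ===== VERDICT (by name: the statement is the Claim_ definition above) =====
theorem term_document_incidence_matrix_spec : Claim_equal_term_document_incidence_matrix := by
  intro collection _
  unfold Spec_term_document_incidence_matrix
  have h := pvFirstKeyWins_nodup collection
  unfold term_document_incidence_matrix term_document_incidence_matrix_alt
  rw [portA_closed _ h, portB_closed _ h]
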